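-- pv_equiv track=rewrite | github.com/4IRL/urls4irl | backend/__init__.py | _collect_css_from_manifest
-- ===== SOURCE A (Python) =====
-- from typing import Mapping, NotRequired, TypedDict
--
-- class ViteManifestEntry(TypedDict):
--     file: str
--     css: NotRequired[list[str]]
--     imports: NotRequired[list[str]]
--
-- def _collect_css_from_manifest(
--     manifest: dict[str, ViteManifestEntry], entrypoint: str
-- ) -> list[str]:
--     """Walk manifest from entrypoint, collecting all CSS paths (incl. shared chunks)."""
--     css_files: list[str] = []
--     visited: set[str] = set()
--
--     def collect(key: str) -> None:
--         if key in visited or key not in manifest: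
--             return
--         visited.add(key)
--         for imported in manifest[key].get("imports", []):
--             collect(imported)
--         css_files.extend(manifest[key].get("css", []))
--
--     collect(entrypoint)
--     return css_files
-- ===== SOURCE B (Python) =====
-- def _collect_css_from_manifest(manifest, entrypoint):
--     """Iterative DFS with an explicit stack of (key, import-iterator) frames."""
--     css_files = []
--     if entrypoint not in manifest:
--         return css_files
--     visited = {entrypoint}
--     stack = [(entrypoint, iter(manifest[entrypoint].get("imports", [])))]
--     while stack:
--         key, imports = stack[-1]
--         for imported in imports:
--             if imported not in visited and imported in manifest:
--                 visited.add(imported)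
--                 stack.append((imported, iter(manifest[imported].get("imports", []))))
--                 break
--         else:
--             css_files.extend(manifest[key].get("css", []))
--             stack.pop()
--     return css_files
-- ===== Notes on version B (the rewrite author's own statement) =====
-- stated objective: alternative
-- what changed: A's recursive DFS helper with a closure is replaced by an iterative DFS: a while-loop over an explicit stack of (key, remaining-imports iterator) frames that reproduces the same mark-on-entry, post-order CSS collection without recursion.
import Mathlib
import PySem

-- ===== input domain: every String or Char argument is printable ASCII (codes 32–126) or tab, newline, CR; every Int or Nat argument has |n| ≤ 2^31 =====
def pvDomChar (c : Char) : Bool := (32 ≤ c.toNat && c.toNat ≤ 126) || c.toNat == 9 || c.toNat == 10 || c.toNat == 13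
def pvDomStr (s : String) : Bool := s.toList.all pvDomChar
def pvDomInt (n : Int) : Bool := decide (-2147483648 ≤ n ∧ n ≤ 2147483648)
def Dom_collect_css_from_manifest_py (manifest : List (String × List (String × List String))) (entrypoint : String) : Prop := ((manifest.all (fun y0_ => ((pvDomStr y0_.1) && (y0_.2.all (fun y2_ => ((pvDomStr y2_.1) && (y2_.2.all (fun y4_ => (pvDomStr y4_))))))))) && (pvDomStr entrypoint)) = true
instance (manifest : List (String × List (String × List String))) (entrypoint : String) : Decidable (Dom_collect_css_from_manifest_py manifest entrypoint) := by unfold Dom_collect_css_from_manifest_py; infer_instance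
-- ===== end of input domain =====

-- B replaces A's recursive DFS by an iterative DFS over an explicit stack of
-- (key, remaining-imports) frames; same return value, no recursion (objective: alternative).

-- ===== PORT A =====
-- Shared dict-access helpers (both Pythons read the manifest the same way):
-- `key in manifest`
def pvMemM (manifest : List (String × List (String × List String))) (k : String) : Bool :=
  (PySem.Dict.ofList manifest).contains k

-- `manifest[key].get(field, [])` (only reached when `key in manifest`)
def pvField (manifest : List (String × List (String × List String))) (k field : String) : List String :=
  match (PySem.Dict.ofList manifest).get? k with
  | none => []
  | some e => (PySem.Dict.ofList e).getD field []

def pvImports (manifest : List (String × List (String × List String))) (k : String) : List String :=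
  pvField manifest k "imports"

def pvCss (manifest : List (String × List (String × List String))) (k : String) : List String :=
  pvField manifest k "css"

-- A's recursive `collect`, run over a worklist of keys (the body of A's `for imported …`
-- loop applied to each key in turn).  The Nat fuel is only a termination device (it bounds
-- the recursion depth; one unit is spent each time a new key is marked visited, so
-- manifest.length + 1 can never run out); the subtype records that fuel never grows,
-- which the well-founded recursion needs.
def collectListA (manifest : List (String × List (String × List String))) :
    (fuel : Nat) → (keys : List String) → (v : PySem.Set String) → (c : List String) →
    {r : Nat × PySem.Set String × List String // r.1 ≤ fuel}
  | fuel, [], v, c => ⟨(fuel, v, c), le_refl _⟩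
  | fuel, i :: is, v, c =>
    if PySem.Set.contains v i || !pvMemM manifest i then
      -- `if key in visited or key not in manifest: return`
      collectListA manifest fuel is v c
    else
      match fuel with
      | 0 => ⟨(0, v, c), Nat.le_refl _⟩  -- dead branch: fuel is always sufficient
      | f + 1 =>
        -- `visited.add(key); for imported in imports: collect(imported); css.extend(css_of_key)`
        let r1 := collectListA manifest f (pvImports manifest i) (PySem.Set.add v i) c
        let r2 := collectListA manifest r1.val.1 is r1.val.2.1 (r1.val.2.2 ++ pvCss manifest i)
        ⟨r2.val, le_trans r2.property (le_trans r1.property (Nat.le_succ f))⟩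
termination_by fuel keys => (fuel, keys.length)
decreasing_by
  · exact Prod.Lex.right fuel (by simp)
  · exact Prod.Lex.left _ _ (Nat.lt_succ_self f)
  · exact Prod.Lex.left _ _ (Nat.lt_succ_of_le r1.property)

def collect_css_from_manifest_py (manifest : List (String × List (String × List String))) (entrypoint : String) : List String :=
  (collectListA manifest (manifest.length + 1) [entrypoint] PySem.Set.empty []).val.2.2

-- ===== PORT B =====
-- B's while-loop: each frame holds (key, remaining imports of key); advance the top
-- frame past visited / missing imports, push the first fresh one, extend css and pop
-- when the frame is exhausted.  Fuel again only bounds the number of pushes.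
def runB (manifest : List (String × List (String × List String))) :
    (fuel : Nat) → (stack : List (String × List String)) →
    (v : PySem.Set String) → (c : List String) → List String
  | _, [], _, c => c
  | fuel, (k, []) :: rest, v, c =>
      -- frame exhausted: `css_files.extend(...); stack.pop()`
      runB manifest fuel rest v (c ++ pvCss manifest k)
  | fuel, (k, i :: is) :: rest, v, c =>
    if !PySem.Set.contains v i && pvMemM manifest i then
      match fuel with
      | 0 => c  -- dead branch: fuel is always sufficient
      | f + 1 =>
        -- `visited.add(imported); stack.append(...)`
        runB manifest f ((i, pvImports manifest i) :: (k, is) :: rest) (PySem.Set.add v i) c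
    else
      runB manifest fuel ((k, is) :: rest) v c
termination_by fuel stack => (fuel, (stack.map (fun p => p.2.length + 1)).sum)
decreasing_by
  · exact Prod.Lex.right fuel (by simp)
  · exact Prod.Lex.left _ _ (Nat.lt_succ_self f)
  · exact Prod.Lex.right fuel (by simp)

def collect_css_from_manifest_py_alt (manifest : List (String × List (String × List String))) (entrypoint : String) : List String :=
  if pvMemM manifest entrypoint then
    runB manifest manifest.length
      [(entrypoint, pvImports manifest entrypoint)]
      (PySem.Set.add PySem.Set.empty entrypoint) []
  else []

-- ===== PRECONDITION & SPEC =====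
def Spec_collect_css_from_manifest_py (manifest : List (String × List (String × List String))) (entrypoint : String) (out : List String) : Prop := out = collect_css_from_manifest_py_alt manifest entrypoint
instance (manifest : List (String × List (String × List String))) (entrypoint : String) (out : List String) : Decidable (Spec_collect_css_from_manifest_py manifest entrypoint out) := by unfold Spec_collect_css_from_manifest_py; infer_instance

-- ===== CLAIM (what is proved, stated in full; the proofs are below) =====
def Claim_equal_collect_css_from_manifest_py : Prop := ∀ (manifest : List (String × List (String × List String))) (entrypoint : String), Dom_collect_css_from_manifest_py manifest entrypoint → Spec_collect_css_from_manifest_py manifest entrypoint (collect_css_from_manifest_py manifest entrypoint)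

-- ===== LEMMAS AND PROOFS =====

-- the distinct manifest keys, and the number of them not yet visited
def pvKeys (manifest : List (String × List (String × List String))) : List String :=
  PySem.List.dedup (manifest.map Prod.fst)

def pvUC (manifest : List (String × List (String × List String))) (v : List String) : Nat :=
  (pvKeys manifest).countP (fun x => !v.contains x)

lemma pv_contains_update {κ ν : Type} [BEq κ] [LawfulBEq κ] (l : List (κ × ν)) (d : PySem.Dict κ ν) (k : κ) :
    (d.update l).contains k = (d.contains k || (l.map Prod.fst).contains k) := by
  induction l generalizing d with
  | nil => simp [PySem.Dict.update]
  | cons p t ih =>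
    show ((d.insert p.1 p.2).update t).contains k = _
    rw [ih, PySem.Dict.contains_insert]
    cases hd : d.contains k <;> simp

lemma pv_mem_keys (manifest : List (String × List (String × List String))) (k : String) :
    pvMemM manifest k = true ↔ k ∈ pvKeys manifest := by
  show (PySem.Dict.update PySem.Dict.empty manifest).contains k = true ↔ _
  rw [pv_contains_update]
  simp [pvKeys]

lemma pv_uc_pos (manifest : List (String × List (String × List String))) (v : List String)
    (k : String) (hk : k ∈ pvKeys manifest) (hv : k ∉ v) :
    1 ≤ pvUC manifest v := by
  have : 0 < pvUC manifest v :=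
    List.countP_pos_iff.mpr ⟨k, hk, by simp [List.contains_eq_mem, hv]⟩
  omega

lemma pv_countP_split {α : Type} [BEq α] [LawfulBEq α] (l : List α) (k : α) (p : α → Bool)
    (hnd : l.Nodup) (hk : k ∈ l) (hp : p k = true) :
    l.countP (fun x => p x && !(x == k)) + 1 = l.countP p := by
  induction l with
  | nil => simp at hk
  | cons a t ih =>
    by_cases hak : a = k
    · subst hak
      have hnt : a ∉ t := (List.nodup_cons.mp hnd).1
      have heq : t.countP (fun x => p x && !(x == a)) = t.countP p := by
        apply List.countP_congr
        intro x hx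
        have : x ≠ a := fun h => hnt (h ▸ hx)
        simp [this]
      simp [hp, heq]
    · have hkt : k ∈ t := by
        rcases List.mem_cons.mp hk with h | h
        · exact absurd h.symm hak
        · exact h
      have := ih (List.nodup_cons.mp hnd).2 hkt
      have hna : a ≠ k := hak
      simp only [List.countP_cons]
      simp [hna]
      omega

lemma pv_uc_add (manifest : List (String × List (String × List String))) (v : PySem.Set String)
    (k : String) (hk : k ∈ pvKeys manifest) (hv : k ∉ v) :
    pvUC manifest (PySem.Set.add v k) + 1 = pvUC manifest v := by
  rw [PySem.Set.add_of_not_mem hv]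
  unfold pvUC
  have h1 : List.countP (fun x => !List.contains (v ++ [k]) x) (pvKeys manifest)
      = List.countP (fun x => (!v.contains x) && !(x == k)) (pvKeys manifest) := by
    apply List.countP_congr
    intro x _
    by_cases hxk : x = k <;> simp [List.contains_eq_mem, hxk, hv]
  rw [h1]
  exact pv_countP_split (pvKeys manifest) k (fun x => !v.contains x)
    (by simp [pvKeys]) hk
    (by simp [List.contains_eq_mem, hv])

-- one-step unfolds of the two machines
lemma collectListA_skip (manifest : List (String × List (String × List String)))
    (fuel : Nat) (i : String) (is : List String) (v : PySem.Set String) (c : List String)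
    (hg : (PySem.Set.contains v i || !pvMemM manifest i) = true) :
    collectListA manifest fuel (i :: is) v c = collectListA manifest fuel is v c := by
  cases fuel with
  | zero => rw [collectListA.eq_2]; simp only [hg, if_true]
  | succ f => rw [collectListA.eq_3]; simp only [hg, if_true]

lemma collectListA_enter (manifest : List (String × List (String × List String)))
    (f : Nat) (i : String) (is : List String) (v : PySem.Set String) (c : List String)
    (hg : (PySem.Set.contains v i || !pvMemM manifest i) = false) :
    (collectListA manifest (f + 1) (i :: is) v c).val =
      (collectListA manifest
        (collectListA manifest f (pvImports manifest i) (PySem.Set.add v i) c).val.1 is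
        (collectListA manifest f (pvImports manifest i) (PySem.Set.add v i) c).val.2.1
        ((collectListA manifest f (pvImports manifest i) (PySem.Set.add v i) c).val.2.2
          ++ pvCss manifest i)).val := by
  rw [collectListA.eq_3]
  simp only [hg, Bool.false_eq_true, if_false]

lemma runB_pop (manifest : List (String × List (String × List String)))
    (fuel : Nat) (k : String) (rest : List (String × List String))
    (v : PySem.Set String) (c : List String) :
    runB manifest fuel ((k, []) :: rest) v c = runB manifest fuel rest v (c ++ pvCss manifest k) := by
  rw [runB.eq_2]

lemma runB_skip (manifest : List (String × List (String × List String)))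
    (fuel : Nat) (k i : String) (is : List String) (rest : List (String × List String))
    (v : PySem.Set String) (c : List String)
    (hg : (!PySem.Set.contains v i && pvMemM manifest i) = false) :
    runB manifest fuel ((k, i :: is) :: rest) v c = runB manifest fuel ((k, is) :: rest) v c := by
  cases fuel with
  | zero => rw [runB.eq_3]; simp only [hg, Bool.false_eq_true, if_false]
  | succ f => rw [runB.eq_4]; simp only [hg, Bool.false_eq_true, if_false]

lemma runB_push (manifest : List (String × List (String × List String)))
    (f : Nat) (k i : String) (is : List String) (rest : List (String × List String))
    (v : PySem.Set String) (c : List String)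
    (hg : (!PySem.Set.contains v i && pvMemM manifest i) = true) :
    runB manifest (f + 1) ((k, i :: is) :: rest) v c =
      runB manifest f ((i, pvImports manifest i) :: (k, is) :: rest) (PySem.Set.add v i) c := by
  rw [runB.eq_4]
  simp only [hg, if_true]

-- fuel is sufficient all along: the number of unvisited manifest keys never exceeds it
lemma pv_inv (manifest : List (String × List (String × List String))) :
    ∀ (fuel : Nat) (keys : List String) (v : PySem.Set String) (c : List String),
      pvUC manifest v ≤ fuel →
      pvUC manifest (collectListA manifest fuel keys v c).val.2.1 ≤
        (collectListA manifest fuel keys v c).val.1 := by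
  intro fuel
  induction fuel using Nat.strong_induction_on with
  | _ fuel ih =>
    intro keys
    induction keys with
    | nil => intro v c h; simpa [collectListA] using h
    | cons i is ihk =>
      intro v c h
      cases hci : PySem.Set.contains v i with
      | true =>
        rw [collectListA_skip manifest fuel i is v c (by rw [hci]; rfl)]
        exact ihk v c h
      | false =>
        cases hmi : pvMemM manifest i with
        | false =>
          rw [collectListA_skip manifest fuel i is v c (by rw [hci, hmi]; rfl)]
          exact ihk v c h
        | true =>
          have hnm : i ∉ v := by
            have : List.contains v i = false := hci
            rw [List.contains_eq_mem] at this
            simpa using this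
          have hkm : i ∈ pvKeys manifest := (pv_mem_keys manifest i).mp hmi
          have h1 : 1 ≤ pvUC manifest v := pv_uc_pos manifest v i hkm hnm
          cases fuel with
          | zero => omega
          | succ f =>
            rw [collectListA_enter manifest f i is v c (by rw [hci, hmi]; rfl)]
            have ha : pvUC manifest (PySem.Set.add v i) ≤ f := by
              have := pv_uc_add manifest v i hkm hnm
              omega
            have h2 := ih f (Nat.lt_succ_self f) (pvImports manifest i) (PySem.Set.add v i) c ha
            exact ih (collectListA manifest f (pvImports manifest i) (PySem.Set.add v i) c).val.1
              (Nat.lt_succ_of_le (collectListA manifest f (pvImports manifest i) (PySem.Set.add v i) c).property)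
              is _ _ h2

-- the bridge: running B's machine with one frame (k, keys) on top is exactly A's
-- worklist pass over keys, followed by appending k's css and popping the frame
lemma pv_bridge (manifest : List (String × List (String × List String))) :
    ∀ (fuel : Nat) (keys : List String) (v : PySem.Set String) (c : List String)
      (k : String) (rest : List (String × List String)),
      pvUC manifest v ≤ fuel →
      runB manifest fuel ((k, keys) :: rest) v c =
        runB manifest (collectListA manifest fuel keys v c).val.1 rest
          (collectListA manifest fuel keys v c).val.2.1
          ((collectListA manifest fuel keys v c).val.2.2 ++ pvCss manifest k) := by
  intro fuel
  induction fuel using Nat.strong_induction_on with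
  | _ fuel ih =>
    intro keys
    induction keys with
    | nil =>
      intro v c k rest h
      rw [runB_pop]
      simp [collectListA]
    | cons i is ihk =>
      intro v c k rest h
      cases hci : PySem.Set.contains v i with
      | true =>
        rw [collectListA_skip manifest fuel i is v c (by rw [hci]; rfl)]
        rw [runB_skip manifest fuel k i is rest v c (by rw [hci]; rfl)]
        exact ihk v c k rest h
      | false =>
        cases hmi : pvMemM manifest i with
        | false =>
          rw [collectListA_skip manifest fuel i is v c (by rw [hci, hmi]; rfl)]
          rw [runB_skip manifest fuel k i is rest v c (by rw [hci, hmi]; rfl)]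
          exact ihk v c k rest h
        | true =>
          have hnm : i ∉ v := by
            have : List.contains v i = false := hci
            rw [List.contains_eq_mem] at this
            simpa using this
          have hkm : i ∈ pvKeys manifest := (pv_mem_keys manifest i).mp hmi
          have h1 : 1 ≤ pvUC manifest v := pv_uc_pos manifest v i hkm hnm
          cases fuel with
          | zero => omega
          | succ f =>
            have ha : pvUC manifest (PySem.Set.add v i) ≤ f := by
              have := pv_uc_add manifest v i hkm hnm
              omega
            rw [runB_push manifest f k i is rest v c (by rw [hci, hmi]; rfl)]
            rw [ih f (Nat.lt_succ_self f) (pvImports manifest i) (PySem.Set.add v i) c i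
                  ((k, is) :: rest) ha]
            have h2 := pv_inv manifest f (pvImports manifest i) (PySem.Set.add v i) c ha
            rw [ih (collectListA manifest f (pvImports manifest i) (PySem.Set.add v i) c).val.1
                  (Nat.lt_succ_of_le (collectListA manifest f (pvImports manifest i) (PySem.Set.add v i) c).property)
                  is _ _ k rest h2]
            rw [collectListA_enter manifest f i is v c (by rw [hci, hmi]; rfl)]

-- ===== VERDICT (by name: the statement is the Claim_ definition above) =====
theorem collect_css_from_manifest_py_spec : Claim_equal_collect_css_from_manifest_py := by
  intro manifest entrypoint _
  unfold Spec_collect_css_from_manifest_py collect_css_from_manifest_py collect_css_from_manifest_py_alt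
  cases hm : pvMemM manifest entrypoint with
  | false =>
    rw [collectListA_skip manifest (manifest.length + 1) entrypoint [] PySem.Set.empty []
          (by rw [hm]; rfl)]
    simp [collectListA]
  | true =>
    have hkm : entrypoint ∈ pvKeys manifest := (pv_mem_keys manifest entrypoint).mp hm
    have hlen : (pvKeys manifest).length ≤ manifest.length := by
      unfold pvKeys
      rw [PySem.List.dedup_eq_ofList]
      simpa using PySem.Set.length_ofList_le (manifest.map Prod.fst)
    have hucv : pvUC manifest PySem.Set.empty ≤ (pvKeys manifest).length := by
      unfold pvUC
      exact List.countP_le_length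
    have ha : pvUC manifest (PySem.Set.add PySem.Set.empty entrypoint) ≤ manifest.length := by
      have hadd := pv_uc_add manifest PySem.Set.empty entrypoint hkm (by simp [PySem.Set.empty])
      omega
    have hstep := collectListA_enter manifest manifest.length entrypoint [] PySem.Set.empty []
      (by rw [hm]; rfl)
    rw [hstep]
    rw [if_pos rfl]
    rw [pv_bridge manifest manifest.length (pvImports manifest entrypoint)
          (PySem.Set.add PySem.Set.empty entrypoint) [] entrypoint [] ha]
    simp [collectListA, runB]
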